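-- pv_equiv track=rewrite | github.com/ElaYJ/Study_Python | Programmers/Level0/Day05.py | my_solution2
-- ===== SOURCE A (Python) =====
-- def my_solution2(n, control):
--     answer = [n]
--     for i in range(len(control)):
--         if control[i] == "w":
--             answer.append(+1)
--         elif control[i] == "s":
--             answer.append(-1)
--         elif control[i] == "d":
--             answer.append(+10)
--         elif control[i] == "a":
--             answer.append(-10)
--
--     return sum(answer)
-- ===== SOURCE B (Python) =====
-- def my_solution2(n, control):
--     return (n + control.count("w") - control.count("s")
--               + 10 * control.count("d") - 10 * control.count("a"))
-- ===== Notes on version B (the rewrite author's own statement) =====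
-- stated objective: idiomatic
-- what changed: Replaces the list-building branch loop and final sum with a closed counting expression over list.count of each control symbol.
import Mathlib
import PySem

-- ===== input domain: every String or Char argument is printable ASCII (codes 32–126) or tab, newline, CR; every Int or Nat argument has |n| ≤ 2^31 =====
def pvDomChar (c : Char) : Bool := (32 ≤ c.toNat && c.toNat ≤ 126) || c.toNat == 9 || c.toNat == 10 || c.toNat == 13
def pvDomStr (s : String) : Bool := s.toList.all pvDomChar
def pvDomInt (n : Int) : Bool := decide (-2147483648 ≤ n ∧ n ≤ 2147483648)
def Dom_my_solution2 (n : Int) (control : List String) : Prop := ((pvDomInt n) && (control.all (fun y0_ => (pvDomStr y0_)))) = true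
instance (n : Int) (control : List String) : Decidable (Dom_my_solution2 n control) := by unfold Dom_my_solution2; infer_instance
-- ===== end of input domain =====

-- B replaces A's index-loop that builds a delta list and sums it with a closed counting expression over list.count (idiomatic).


-- ===== PORT A =====
-- A: answer = [n]; for i in range(len(control)): append a delta per recognised symbol; return sum(answer).
-- control[i] with i ∈ range(len(control)) is always in range, ported as pyGetD with an unused default.
def my_solution2 (n : Int) (control : List String) : Int :=
  let answer :=
    (PySem.List.pyRange 0 (control.length : Int) 1).foldl (fun (acc : List Int) i =>
      let c := PySem.List.pyGetD control i ""
      if c = "w" then acc ++ [(1 : Int)]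
      else if c = "s" then acc ++ [(-1 : Int)]
      else if c = "d" then acc ++ [(10 : Int)]
      else if c = "a" then acc ++ [(-10 : Int)]
      else acc) [n]
  answer.sum

-- ===== PORT B =====
def my_solution2_alt (n : Int) (control : List String) : Int :=
  n + (PySem.List.count control "w" : Int) - (PySem.List.count control "s" : Int)
    + 10 * (PySem.List.count control "d" : Int) - 10 * (PySem.List.count control "a" : Int)

-- ===== PRECONDITION & SPEC =====
def Spec_my_solution2 (n : Int) (control : List String) (out : Int) : Prop := out = my_solution2_alt n control
instance (n : Int) (control : List String) (out : Int) : Decidable (Spec_my_solution2 n control out) := by unfold Spec_my_solution2; infer_instance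

-- ===== CLAIM (what is proved, stated in full; the proofs are below) =====
def Claim_equal_my_solution2 : Prop := ∀ (n : Int) (control : List String), Dom_my_solution2 n control → Spec_my_solution2 n control (my_solution2 n control)

-- ===== LEMMAS AND PROOFS =====

-- The per-element step of A's loop, after the range/index bridge.
def pvStep (acc : List Int) (c : String) : List Int :=
  if c = "w" then acc ++ [(1 : Int)]
  else if c = "s" then acc ++ [(-1 : Int)]
  else if c = "d" then acc ++ [(10 : Int)]
  else if c = "a" then acc ++ [(-10 : Int)]
  else acc

theorem pvStep_sum (acc : List Int) (c : String) :
    (pvStep acc c).sum = acc.sum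
      + (if c = "w" then (1 : Int) else 0) + (if c = "s" then (-1 : Int) else 0)
      + (if c = "d" then (10 : Int) else 0) + (if c = "a" then (-10 : Int) else 0) := by
  unfold pvStep
  by_cases hw : c = "w" <;> by_cases hs : c = "s" <;> by_cases hd : c = "d" <;>
    by_cases ha : c = "a" <;> simp_all

theorem pvFold_sum (control : List String) (acc : List Int) :
    (control.foldl pvStep acc).sum
      = acc.sum + (control.count "w" : Int) - (control.count "s" : Int)
          + 10 * (control.count "d" : Int) - 10 * (control.count "a" : Int) := by
  induction control generalizing acc with
  | nil => simp
  | cons c cs ih =>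
    simp only [List.foldl_cons, List.count_cons]
    rw [ih, pvStep_sum]
    by_cases hw : c = "w" <;> by_cases hs : c = "s" <;> by_cases hd : c = "d" <;>
      by_cases ha : c = "a" <;> simp_all <;> ring

theorem my_solution2_spec : Claim_equal_my_solution2 := by
  intro n control _
  unfold Spec_my_solution2 my_solution2 my_solution2_alt
  simp only
  rw [show (fun (acc : List Int) i =>
      let c := PySem.List.pyGetD control i ""
      if c = "w" then acc ++ [(1 : Int)]
      else if c = "s" then acc ++ [(-1 : Int)]
      else if c = "d" then acc ++ [(10 : Int)]
      else if c = "a" then acc ++ [(-10 : Int)]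
      else acc)
    = (fun (acc : List Int) i => pvStep acc (PySem.List.pyGetD control i "")) from rfl]
  rw [PySem.List.foldl_pyRange_zero_pyGetD' control "" pvStep [n]]
  rw [pvFold_sum]
  simp [PySem.List.count_eq]
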